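-- pv_equiv track=rewrite | github.com/elfffffy/Studying_Algorithm | Greedy/Challenges/greedy-6-2.py | solution
-- ===== SOURCE A (Python) =====
-- def solution(food_times, k):
--     answer = 0
--     while k > 0:
--         for i in range(len(food_times)):
--             k -= 1
--             if food_times[i] != 0:
--                 food_times[i] -= 1
--                 if i == len(food_times) -1 :
--                     answer = 1
--                 else :
--                     answer = i + 1
--     return answer
-- ===== SOURCE B (Python) =====
-- def solution(food_times, k):
--     n = len(food_times)
--     if n == 0 or k <= 0:
--         return 0
--     passes = -(-k // n)                       # ceil(k / n): full rounds of the countdown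
--     last_round = min(passes, max(food_times)) # last round in which any food is still eaten
--     if last_round <= 0:
--         return 0
--     for i in reversed(range(n)):
--         if food_times[i] >= last_round:
--             return 1 if i == n - 1 else i + 1
-- ===== Notes on version B (the rewrite author's own statement) =====
-- stated objective: faster
-- what changed: A simulates every round of the cyclic countdown in O(k); B computes the number of rounds ceil(k/n) in closed form, takes the last round in which anything is still eaten as min(passes, max(food_times)), and scans once from the right for the last food surviving into that round; Pre_ restricts k>0 inputs to the problem's natural domain (nonnegative food counts, nonempty list: on the empty list with k>0 A never returns); B does not mutate food_times (return-value equivalence).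
-- outside the precondition, e.g. on solution([-1], 3): A returns 1, B returns 0; on solution([], 3): A does not finish within the time limit, B returns 0
import Mathlib
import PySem

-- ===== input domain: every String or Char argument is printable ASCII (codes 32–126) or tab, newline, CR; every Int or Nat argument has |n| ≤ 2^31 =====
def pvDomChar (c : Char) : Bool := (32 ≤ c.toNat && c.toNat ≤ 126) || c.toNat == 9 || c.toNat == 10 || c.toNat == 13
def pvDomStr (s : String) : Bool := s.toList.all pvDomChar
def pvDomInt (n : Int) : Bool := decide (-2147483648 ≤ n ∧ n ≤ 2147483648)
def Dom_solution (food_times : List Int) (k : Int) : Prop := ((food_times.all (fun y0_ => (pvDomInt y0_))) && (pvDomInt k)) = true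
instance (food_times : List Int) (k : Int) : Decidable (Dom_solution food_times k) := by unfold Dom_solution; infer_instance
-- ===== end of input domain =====

-- B replaces A's round-by-round simulation by a closed-form round count and one backwards scan;
-- A mutates food_times in place, B does not: the equivalence proved here is about the return value only.

-- ===== PORT A =====
-- one body of A's inner for-loop: i ranges over range(len(food_times)); indices are always in range
def stepA (st : List Int × Int × Int) (i : Nat) : List Int × Int × Int :=
  let ft := st.1
  let k := st.2.1 - 1
  let v := ft.getD i 0            -- exact: i < ft.length on every call (range(len(food_times)))
  if v ≠ 0 then
    (ft.set i (v - 1), k, if i = ft.length - 1 then 1 else (i : Int) + 1)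
  else
    (ft, k, st.2.2)

-- cited by whileA's decreasing_by: one pass subtracts the (constant) length from k
theorem foldl_stepA_k (l : List Nat) (st : List Int × Int × Int) :
    (l.foldl stepA st).2.1 = st.2.1 - l.length ∧ (l.foldl stepA st).1.length = st.1.length := by
  induction l generalizing st with
  | nil => simp
  | cons i t ih =>
    have h := ih (stepA st i)
    have h1 : (stepA st i).2.1 = st.2.1 - 1 := by
      simp only [stepA]; split <;> simp
    have h2 : (stepA st i).1.length = st.1.length := by
      simp only [stepA]; split <;> simp
    simp only [List.foldl_cons, h.1, h.2, h1, h2, List.length_cons]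
    constructor
    · push_cast; ring
    · trivial

-- A's while-loop; the 'ft ≠ []' guard only makes the function total where Python diverges
def whileA (ft : List Int) (k ans : Int) : Int :=
  if h : 0 < k ∧ ft ≠ [] then
    let st := (List.range ft.length).foldl stepA (ft, k, ans)
    whileA st.1 st.2.1 st.2.2
  else ans
termination_by k.toNat
decreasing_by
  have hk := (foldl_stepA_k (List.range ft.length) (ft, k, ans)).1
  have hn : 0 < ft.length := List.length_pos_iff.mpr h.2
  simp only [hk, List.length_range]
  omega

def solution (food_times : List Int) (k : Int) : Int := whileA food_times k 0

-- ===== PORT B =====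
-- Source B's final backwards scan: first i from n-1 down to 0 with food_times[i] >= last_round;
-- the none branch is unreachable when last_round ≤ max(food_times) and 0 < last_round
def lastEatB (ft : List Int) (p : Int) (n : Nat) : Int :=
  match (List.range n).reverse.find? (fun i => decide (p ≤ ft.getD i 0)) with
  | some i => if i = n - 1 then 1 else (i : Int) + 1
  | none => 0

def solution_alt (food_times : List Int) (k : Int) : Int :=
  let n := food_times.length
  if n = 0 ∨ k ≤ 0 then 0
  else
    let passes := -(PySem.Int.floordiv (-k) (n : Int))      -- -(-k // n) = ceil(k/n)
    -- min(passes, max(food_times)); the list is nonempty here, so max? is some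
    let lastRound := min passes ((PySem.List.max? food_times (fun y => y)).getD 0)
    if lastRound ≤ 0 then 0
    else lastEatB food_times lastRound n

-- ===== PRECONDITION & SPEC =====
-- Pre_ restricts to the problem's natural domain when k > 0: food counts are amounts, so they
-- must be nonnegative, and the list must be nonempty (on the empty list with k > 0 A never
-- returns); for k ≤ 0 every input is admitted.
def Pre_solution (food_times : List Int) (k : Int) : Prop :=
  k ≤ 0 ∨ ((∀ t ∈ food_times, 0 ≤ t) ∧ food_times ≠ [])
instance (food_times : List Int) (k : Int) : Decidable (Pre_solution food_times k) := by
  unfold Pre_solution; infer_instance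
def pvWitness_solution : List Int × Int := ([3, 1, 2], 5)
def Spec_solution (food_times : List Int) (k : Int) (out : Int) : Prop := out = solution_alt food_times k
instance (food_times : List Int) (k : Int) (out : Int) : Decidable (Spec_solution food_times k out) := by unfold Spec_solution; infer_instance

-- ===== CLAIM (what is proved, stated in full; the proofs are below) =====
def Claim_equal_solution : Prop := ∀ (food_times : List Int) (k : Int), Dom_solution food_times k → Pre_solution food_times k → Spec_solution food_times k (solution food_times k)

-- ===== LEMMAS AND PROOFS =====

-- A's update of one food count
def step1 (t : Int) : Int := if t ≠ 0 then t - 1 else t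

-- the answer encoding both programs share
def encL (n i : Nat) : Int := if i = n - 1 then 1 else (i : Int) + 1

-- index of the last element satisfying P
def lastSat (P : Int → Bool) : List Int → Option Nat
  | [] => none
  | h :: t =>
    match lastSat P t with
    | some j => some (j + 1)
    | none => if P h then some 0 else none

theorem lastSat_congr {P Q : Int → Bool} {l : List Int} (h : ∀ t ∈ l, P t = Q t) :
    lastSat P l = lastSat Q l := by
  induction l with
  | nil => rfl
  | cons a t ih =>
    simp only [lastSat, ih (fun x hx => h x (List.mem_cons_of_mem a hx)),
      h a (List.mem_cons_self)]

theorem lastSat_map (P : Int → Bool) (f : Int → Int) (l : List Int) :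
    lastSat P (l.map f) = lastSat (fun t => P (f t)) l := by
  induction l with
  | nil => rfl
  | cons a t ih => simp only [List.map_cons, lastSat, ih]

theorem lastSat_eq_none {P : Int → Bool} {l : List Int} (h : ∀ t ∈ l, P t = false) :
    lastSat P l = none := by
  induction l with
  | nil => rfl
  | cons a t ih =>
    simp only [lastSat, ih (fun x hx => h x (List.mem_cons_of_mem a hx)),
      h a (List.mem_cons_self)]
    rfl

theorem lastSat_isSome_of_mem {P : Int → Bool} {l : List Int} {x : Int}
    (hx : x ∈ l) (hP : P x = true) : (lastSat P l).isSome := by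
  induction l with
  | nil => cases hx
  | cons a t ih =>
    simp only [lastSat]
    rcases List.mem_cons.mp hx with rfl | hm
    · cases h : lastSat P t <;> simp [h, hP]
    · have := ih hm
      cases h : lastSat P t <;> simp [h] at this ⊢

theorem lastSat_append_singleton (P : Int → Bool) (ys : List Int) (y : Int) :
    lastSat P (ys ++ [y]) = if P y then some ys.length else lastSat P ys := by
  induction ys with
  | nil => simp [lastSat]
  | cons a t ih =>
    simp only [List.cons_append, lastSat, ih]
    by_cases hy : P y <;> simp [hy] <;> cases h : lastSat P t <;> simp [h]

theorem find?_congr' {α : Type} (l : List α) (p q : α → Bool)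
    (h : ∀ a ∈ l, p a = q a) : l.find? p = l.find? q := by
  induction l with
  | nil => rfl
  | cons a t ih =>
    simp only [List.find?]
    rw [h a List.mem_cons_self]
    cases hq : q a
    · simp [ih (fun x hx => h x (List.mem_cons_of_mem a hx))]
    · rfl

theorem getD_append_len (pre : List Int) (h : Int) (t : List Int) :
    (pre ++ h :: t).getD pre.length 0 = h := by
  induction pre with
  | nil => rfl
  | cons a s ih => simpa using ih

theorem getD_append_lt (pre : List Int) (suf : List Int) (i : Nat) (hi : i < pre.length) :
    (pre ++ suf).getD i 0 = pre.getD i 0 := by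
  simp [List.getD_eq_getElem?_getD, List.getElem?_append_left hi]

theorem set_append_len (pre : List Int) (h : Int) (t : List Int) (v : Int) :
    (pre ++ h :: t).set pre.length v = pre ++ v :: t := by
  induction pre with
  | nil => rfl
  | cons a s ih => simpa using ih

-- the last index in ft (scanned backwards) satisfying P, as Source B computes it
theorem find?_rev_range (ft : List Int) (P : Int → Bool) :
    (List.range ft.length).reverse.find? (fun i => P (ft.getD i 0)) = lastSat P ft := by
  induction ft using List.reverseRecOn with
  | nil => rfl
  | append_singleton ys y ih =>
    rw [lastSat_append_singleton]
    have hlen : (ys ++ [y]).length = ys.length + 1 := by simp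
    rw [hlen, List.range_succ, List.reverse_append]
    simp only [List.reverse_cons, List.reverse_nil, List.nil_append, List.cons_append,
      List.find?]
    rw [getD_append_len ys y []]
    cases hy : P y
    · simp only [List.nil_append]
      rw [find?_congr' _ _ (fun i => P (ys.getD i 0)) ?_, ih]
      · simp [hy]
      · intro i hi
        have : i < ys.length := by
          have := List.mem_reverse.mp hi
          exact List.mem_range.mp this
        rw [getD_append_lt ys [y] i this]
    · simp [hy]

theorem lastEatB_eq (ft : List Int) (p : Int) :
    lastEatB ft p ft.length =
      (match lastSat (fun t => decide (p ≤ t)) ft with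
       | some i => encL ft.length i
       | none => 0) := by
  unfold lastEatB encL
  rw [find?_rev_range ft (fun t => decide (p ≤ t))]

-- ----- one full pass of A -----

theorem pass_gen (suf : List Int) : ∀ (pre : List Int) (k ans : Int),
    (List.range' pre.length suf.length).foldl stepA (pre ++ suf, k, ans)
      = (pre ++ suf.map step1, k - suf.length,
         match lastSat (fun t => decide (t ≠ 0)) suf with
         | some j => encL (pre.length + suf.length) (pre.length + j)
         | none => ans) := by
  induction suf with
  | nil => intro pre k ans; simp [lastSat]
  | cons h t ih =>
    intro pre k ans
    rw [show (h :: t).length = t.length + 1 from rfl, List.range'_succ, List.foldl_cons]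
    have hget : (pre ++ h :: t).getD pre.length 0 = h := getD_append_len pre h t
    have hlen : (pre ++ h :: t).length = pre.length + (t.length + 1) := by simp
    have ihlen : (pre ++ [h - 1]).length = pre.length + 1 := by simp
    have ihlen0 : (pre ++ [(0:Int)]).length = pre.length + 1 := by simp
    by_cases hh : h ≠ 0
    · have hstep : stepA (pre ++ h :: t, k, ans) pre.length
          = (pre ++ (h - 1) :: t, k - 1,
             if pre.length = pre.length + (t.length + 1) - 1 then 1 else (pre.length : Int) + 1) := by
        simp only [stepA, hget, hlen, set_append_len]
        rw [if_pos hh]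
      rw [hstep]
      have hIH := ih (pre ++ [h - 1]) (k - 1)
        (if pre.length = pre.length + (t.length + 1) - 1 then 1 else (pre.length : Int) + 1)
      rw [ihlen] at hIH
      rw [show pre ++ (h - 1) :: t = (pre ++ [h - 1]) ++ t by simp]
      rw [hIH]
      have hst : step1 h = h - 1 := by simp [step1, hh]
      simp only [Prod.mk.injEq, List.append_assoc, List.singleton_append, List.map_cons, hst]
      refine ⟨by simp, by push_cast; ring, ?_⟩
      have hlsc : lastSat (fun t => decide (t ≠ 0)) (h :: t)
          = (match lastSat (fun t => decide (t ≠ 0)) t with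
             | some j => some (j + 1)
             | none => some 0) := by
        simp only [lastSat, decide_eq_true hh, if_true]
      rw [hlsc]
      cases hl : lastSat (fun t => decide (t ≠ 0)) t
      · simp only [encL]
        split <;> split <;> first | rfl | (exfalso; omega)
      · simp only [encL]
        rename_i j
        have h1 : pre.length + 1 + j = pre.length + (j + 1) := by omega
        rw [h1]
        have h2 : pre.length + 1 + t.length = pre.length + (t.length + 1) := by omega
        rw [h2]
    · have h0 : h = 0 := by omega
      subst h0
      have hstep : stepA (pre ++ 0 :: t, k, ans) pre.length = (pre ++ 0 :: t, k - 1, ans) := by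
        simp [stepA, hget]
      rw [hstep]
      have hIH := ih (pre ++ [(0:Int)]) (k - 1) ans
      rw [ihlen0] at hIH
      rw [show pre ++ (0:Int) :: t = (pre ++ [(0:Int)]) ++ t by simp]
      rw [hIH]
      have hst : step1 (0:Int) = 0 := by simp [step1]
      simp only [Prod.mk.injEq, List.append_assoc, List.singleton_append, List.map_cons, hst]
      refine ⟨by simp, by push_cast; ring, ?_⟩
      have hlsc : lastSat (fun t => decide (t ≠ 0)) ((0:Int) :: t)
          = (match lastSat (fun t => decide (t ≠ 0)) t with
             | some j => some (j + 1)
             | none => none) := by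
        simp only [lastSat, decide_not, decide_eq_true_eq]
        cases hl : lastSat (fun t => decide (t ≠ 0)) t <;> simp
      rw [hlsc]
      cases hl : lastSat (fun t => decide (t ≠ 0)) t
      · rfl
      · simp only [encL]
        rename_i j
        have h1 : pre.length + 1 + j = pre.length + (j + 1) := by omega
        rw [h1]
        have h2 : pre.length + 1 + t.length = pre.length + (t.length + 1) := by omega
        rw [h2]

theorem pass_spec (ft : List Int) (k ans : Int) :
    (List.range ft.length).foldl stepA (ft, k, ans)
      = (ft.map step1, k - ft.length,
         match lastSat (fun t => decide (t ≠ 0)) ft with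
         | some j => encL ft.length j
         | none => ans) := by
  have := pass_gen ft [] k ans
  simpa [List.range_eq_range'] using this

-- ----- max(food_times) on a nonnegative list as a foldl from 0 -----

def M (ft : List Int) : Int := (PySem.List.max? ft (fun y => y)).getD 0

theorem foldl_max_le (l : List Int) : ∀ a : Int, a ≤ l.foldl max a ∧ ∀ t ∈ l, t ≤ l.foldl max a := by
  induction l with
  | nil => intro a; simp
  | cons h t ih =>
    intro a
    have := ih (max a h)
    refine ⟨le_trans (le_max_left a h) this.1, ?_⟩
    intro x hx
    rcases List.mem_cons.mp hx with rfl | hm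
    · exact le_trans (le_max_right a x) this.1
    · exact this.2 x hm

theorem foldl_max_mem (l : List Int) : ∀ a : Int, l.foldl max a = a ∨ l.foldl max a ∈ l := by
  induction l with
  | nil => intro a; simp
  | cons h t ih =>
    intro a
    rcases ih (max a h) with heq | hm
    · rcases max_cases a h with ⟨h1, _⟩ | ⟨h1, _⟩
      · left; rw [List.foldl_cons, heq, h1]
      · right; rw [List.foldl_cons, heq, h1]; exact List.mem_cons_self
    · right; exact List.mem_cons_of_mem h hm

theorem foldl_max_map_pred (l : List Int) : ∀ a : Int,
    (l.map step1).foldl max (max (a - 1) 0) = max ((l.foldl max a) - 1) 0 ∨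
    ∃ t ∈ l, t < 0 := by
  induction l with
  | nil => intro a; left; simp
  | cons h t ih =>
    intro a
    by_cases hneg : h < 0
    · right; exact ⟨h, List.mem_cons_self, hneg⟩
    · rcases ih (max a h) with heq | ⟨x, hx, hxneg⟩
      · left
        simp only [List.map_cons, List.foldl_cons]
        rw [show max (max (a - 1) 0) (step1 h) = max (max a h - 1) 0 by
          simp only [step1]; split <;> omega]
        exact heq
      · right; exact ⟨x, List.mem_cons_of_mem h hx, hxneg⟩

-- the running maximum from 0; equals max(food_times) on a nonneg nonempty list
def mx (ft : List Int) : Int := ft.foldl max 0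

theorem M_eq_mx (ft : List Int) (hne : ft ≠ []) (hnn : ∀ t ∈ ft, 0 ≤ t) :
    (PySem.List.max? ft (fun y => y)).getD 0 = mx ft := by
  cases ft with
  | nil => exact absurd rfl hne
  | cons h t =>
    rw [PySem.List.max?_id_cons]
    have hh := hnn h List.mem_cons_self
    have h0 : max (0 : Int) h = h := by omega
    simp only [Option.getD_some, mx, List.foldl_cons, h0]

-- ----- ceiling brackets -----

theorem ceil_brackets (k : Int) (n : Nat) (hn : 0 < n) :
    (-(PySem.Int.floordiv (-k) (n : Int)) - 1) * n < k ∧ k ≤ -(PySem.Int.floordiv (-k) (n : Int)) * n := by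
  have hn' : (0 : Int) < (n : Int) := by exact_mod_cast hn
  exact (PySem.Int.neg_floordiv_neg_eq_iff_of_pos hn').mp rfl

theorem ceil_eq (k q : Int) (n : Nat) (hn : 0 < n)
    (h1 : (q - 1) * n < k) (h2 : k ≤ q * n) :
    -(PySem.Int.floordiv (-k) (n : Int)) = q := by
  have hn' : (0 : Int) < (n : Int) := by exact_mod_cast hn
  exact (PySem.Int.neg_floordiv_neg_eq_iff_of_pos hn').mpr ⟨h1, h2⟩

-- ----- the closed form G (B's computation with a free accumulator) -----

def G (ft : List Int) (k ans : Int) : Int :=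
  if k ≤ 0 ∨ ft = [] then ans
  else if min (-(PySem.Int.floordiv (-k) (ft.length : Int))) (mx ft) ≤ 0 then ans
  else lastEatB ft (min (-(PySem.Int.floordiv (-k) (ft.length : Int))) (mx ft)) ft.length

-- ----- predicate lemmas (on nonnegative entries) -----

theorem pred_one (t : Int) (ht : 0 ≤ t) : decide ((1:Int) ≤ t) = decide (t ≠ 0) := by
  by_cases h : t = 0 <;> simp [h] <;> omega

theorem pred_shift (q t : Int) (hq : 2 ≤ q) (ht : 0 ≤ t) :
    decide (q - 1 ≤ step1 t) = decide (q ≤ t) := by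
  simp only [step1]
  split <;> simp <;> omega

theorem step1_nonneg (t : Int) (ht : 0 ≤ t) : 0 ≤ step1 t := by
  simp only [step1]; split <;> omega

theorem mx_nonneg (ft : List Int) : 0 ≤ mx ft := (foldl_max_le ft 0).1

theorem mx_mem (ft : List Int) (hm : mx ft ≠ 0) : mx ft ∈ ft := by
  rcases foldl_max_mem ft 0 with h | h
  · exact absurd h hm
  · exact h

theorem mx_map_step1 (ft : List Int) (hnn : ∀ t ∈ ft, 0 ≤ t) :
    mx (ft.map step1) = max (mx ft - 1) 0 := by
  rcases foldl_max_map_pred ft 0 with h | ⟨x, hx, hxneg⟩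
  · unfold mx
    have h0 : max ((0:Int) - 1) 0 = 0 := by norm_num
    rw [h0] at h
    exact h
  · exact absurd (hnn x hx) (by omega)

theorem lastEatB_shift (ft : List Int) (q : Int) (hq : 2 ≤ q) (hnn : ∀ t ∈ ft, 0 ≤ t) :
    lastEatB (ft.map step1) (q - 1) ft.length = lastEatB ft q ft.length := by
  have h1 := lastEatB_eq (ft.map step1) (q - 1)
  rw [List.length_map] at h1
  rw [h1, lastSat_map, lastSat_congr (fun t ht => pred_shift q t hq (hnn t ht)), ← lastEatB_eq]

theorem ans_of_all_zero (ft : List Int) (ans : Int)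
    (hnn : ∀ t ∈ ft, 0 ≤ t) (hm : mx ft = 0) :
    (match lastSat (fun t => decide (t ≠ 0)) ft with
     | some j => encL ft.length j
     | none => ans) = ans := by
  have hnone : lastSat (fun t => decide (t ≠ 0)) ft = none := by
    apply lastSat_eq_none
    intro t ht
    have h1 := hnn t ht
    have h2 : t ≤ mx ft := (foldl_max_le ft 0).2 t ht
    simp
    omega
  rw [hnone]

theorem ans_eq_lastEat_one (ft : List Int) (ans : Int)
    (hnn : ∀ t ∈ ft, 0 ≤ t) (hm : mx ft ≠ 0) :
    (match lastSat (fun t => decide (t ≠ 0)) ft with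
     | some j => encL ft.length j
     | none => ans) = lastEatB ft 1 ft.length := by
  rw [lastEatB_eq ft 1, lastSat_congr (fun t ht => pred_one t (hnn t ht))]
  have hsome := lastSat_isSome_of_mem (P := fun t => decide (t ≠ 0)) (mx_mem ft hm)
    (decide_eq_true hm)
  cases hls : lastSat (fun t => decide (t ≠ 0)) ft
  · rw [hls] at hsome; simp at hsome
  · rfl

-- ----- the inductive step: one pass preserves G -----

theorem G_step (ft : List Int) (k ans : Int) (hk : 0 < k) (hft : ft ≠ [])
    (hnn : ∀ t ∈ ft, 0 ≤ t) :
    G (ft.map step1) (k - ft.length)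
      (match lastSat (fun t => decide (t ≠ 0)) ft with
       | some j => encL ft.length j
       | none => ans)
      = G ft k ans := by
  have hn : 0 < ft.length := List.length_pos_iff.mpr hft
  have hn' : (0 : Int) < (ft.length : Int) := by exact_mod_cast hn
  obtain ⟨hb1, hb2⟩ := ceil_brackets k ft.length hn
  have hmapne : ft.map step1 ≠ [] := by
    intro h; exact hft (List.map_eq_nil_iff.mp h)
  have hmx0 := mx_nonneg ft
  have hR : ¬(k ≤ 0 ∨ ft = []) := by
    rintro (h | h)
    · omega
    · exact hft h
  by_cases hlast : k - (ft.length : Int) ≤ 0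
  · -- final pass: the round count is 1
    have hPe : -(PySem.Int.floordiv (-k) ((ft.length : Int))) = 1 :=
      ceil_eq k 1 ft.length hn (by nlinarith) (by nlinarith)
    rw [G, if_pos (Or.inl hlast), G, if_neg hR, hPe]
    by_cases hm : mx ft = 0
    · rw [if_pos (by omega)]
      exact ans_of_all_zero ft ans hnn hm
    · have h1 : min (1:Int) (mx ft) = 1 := by omega
      rw [h1, if_neg (by omega)]
      exact ans_eq_lastEat_one ft ans hnn hm
  · -- at least one further pass: the round count decreases by exactly 1
    have hL : ¬(k - (ft.length : Int) ≤ 0 ∨ ft.map step1 = []) := by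
      rintro (h | h)
      · omega
      · exact hmapne h
    rw [G, if_neg hL, G, if_neg hR]
    simp only [List.length_map]
    have hp' : -(PySem.Int.floordiv (-(k - (ft.length : Int))) ((ft.length : Int)))
        = -(PySem.Int.floordiv (-k) ((ft.length : Int))) - 1 := by
      apply ceil_eq _ _ _ hn
      · nlinarith
      · nlinarith
    rw [hp', mx_map_step1 ft hnn]
    set P := -(PySem.Int.floordiv (-k) ((ft.length : Int))) with hPdef
    have hP2 : 2 ≤ P := by
      by_contra h
      push_neg at h
      have h1 : P ≤ 1 := by omega
      have h2 : P * (ft.length : Int) ≤ 1 * (ft.length : Int) :=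
        mul_le_mul_of_nonneg_right h1 (le_of_lt hn')
      nlinarith [hb2]
    by_cases hm0 : mx ft = 0
    · rw [if_pos (show min (P - 1) (max (mx ft - 1) 0) ≤ 0 by omega),
         if_pos (show min P (mx ft) ≤ 0 by omega)]
      exact ans_of_all_zero ft ans hnn hm0
    · by_cases hm1 : mx ft = 1
      · rw [if_pos (show min (P - 1) (max (mx ft - 1) 0) ≤ 0 by omega)]
        have h1 : min P (mx ft) = 1 := by omega
        rw [h1, if_neg (by omega)]
        exact ans_eq_lastEat_one ft ans hnn hm0
      · have hm2 : 2 ≤ mx ft := by omega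
        have hq : min (P - 1) (max (mx ft - 1) 0) = min P (mx ft) - 1 := by omega
        rw [hq, if_neg (show ¬ min P (mx ft) - 1 ≤ 0 by omega),
            if_neg (show ¬ min P (mx ft) ≤ 0 by omega)]
        exact lastEatB_shift ft (min P (mx ft)) (by omega) hnn

-- ----- whileA equals G on nonnegative lists -----

theorem whileA_eq_G (ft : List Int) (k ans : Int) (hnn : ∀ t ∈ ft, 0 ≤ t) :
    whileA ft k ans = G ft k ans := by
  generalize hkn : k.toNat = kn
  induction kn using Nat.strong_induction_on generalizing ft k ans with
  | _ kn IH =>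
    rw [whileA]
    by_cases h : 0 < k ∧ ft ≠ []
    · rw [dif_pos h]
      have hn : 0 < ft.length := List.length_pos_iff.mpr h.2
      simp only [pass_spec]
      have hnn' : ∀ t ∈ ft.map step1, 0 ≤ t := by
        intro t ht
        obtain ⟨x, hx, rfl⟩ := List.mem_map.mp ht
        exact step1_nonneg x (hnn x hx)
      rw [IH (k - (ft.length : Int)).toNat (by omega) _ _ _ hnn' rfl]
      exact G_step ft k ans h.1 h.2 hnn
    · rw [dif_neg h]
      have hg : k ≤ 0 ∨ ft = [] := by
        push_neg at h
        by_cases hk : 0 < k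
        · exact Or.inr (h hk)
        · exact Or.inl (by omega)
      rw [G, if_pos hg]

theorem G_zero_eq_alt (ft : List Int) (k : Int) (hne : ft ≠ []) (hnn : ∀ t ∈ ft, 0 ≤ t) :
    G ft k 0 = solution_alt ft k := by
  unfold G solution_alt
  by_cases hk : k ≤ 0
  · rw [if_pos (Or.inl hk), if_pos (Or.inr hk)]
  · have h1 : ¬(k ≤ 0 ∨ ft = []) := by
      rintro (h | h)
      · exact hk h
      · exact hne h
    have h2 : ¬(ft.length = 0 ∨ k ≤ 0) := by
      rintro (h | h)
      · exact hne (List.length_eq_zero_iff.mp h)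
      · exact hk h
    rw [if_neg h1, if_neg h2]
    simp only [M_eq_mx ft hne hnn]

-- ===== VERDICT (by name: the statement is the Claim_ definition above) =====
theorem solution_spec : Claim_equal_solution := by
  intro ft k _ hpre
  unfold Spec_solution solution
  rcases hpre with hk | ⟨hnn, hne⟩
  · rw [whileA, dif_neg (by omega), solution_alt]
    simp only
    rw [if_pos (Or.inr hk)]
  · rw [whileA_eq_G ft k 0 hnn, G_zero_eq_alt ft k hne hnn]
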